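-- pv_equiv track=rewrite | github.com/Xvedk/LEETCODE-ALL | Streak/2025/May/31-05-2025.py | board_to_list
-- ===== SOURCE A (Python) =====
-- def board_to_list(board: list[list[int]]) -> list[int]:
--     parse_left = True
--     output = []
--
--     for row in range(len(board) - 1, -1, -1):
--         if parse_left:
--             output.extend(board[row])
--             parse_left = False
--         else:
--             output.extend(reversed(board[row]))
--             parse_left = True
--
--     for i in range(len(output)):
--         if output[i] != -1:
--             output[i] -= 1
--
--     return output
-- ===== SOURCE B (Python) =====
-- def board_to_list(board: list[list[int]]) -> list[int]:
--     # Recursive top-down decomposition: rows below first (back-to-front build),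
--     # row orientation decided by its distance from the bottom (= len of remaining rows).
--     def dec(c):
--         return c - 1 if c != -1 else c
--     def go(rows):
--         if not rows:
--             return []
--         head, tail = rows[0], rows[1:]
--         cells = head if len(tail) % 2 == 0 else head[::-1]
--         return go(tail) + [dec(c) for c in cells]
--     return go(board)
-- ===== Notes on version B (the rewrite author's own statement) =====
-- stated objective: alternative
-- what changed: Replaces A's bottom-up index loop with a toggling direction flag plus a second in-place decrement pass by a structural top-down recursion that builds the output back-to-front, orienting each row by the parity of the number of rows below it and decrementing inline.
import Mathlib
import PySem

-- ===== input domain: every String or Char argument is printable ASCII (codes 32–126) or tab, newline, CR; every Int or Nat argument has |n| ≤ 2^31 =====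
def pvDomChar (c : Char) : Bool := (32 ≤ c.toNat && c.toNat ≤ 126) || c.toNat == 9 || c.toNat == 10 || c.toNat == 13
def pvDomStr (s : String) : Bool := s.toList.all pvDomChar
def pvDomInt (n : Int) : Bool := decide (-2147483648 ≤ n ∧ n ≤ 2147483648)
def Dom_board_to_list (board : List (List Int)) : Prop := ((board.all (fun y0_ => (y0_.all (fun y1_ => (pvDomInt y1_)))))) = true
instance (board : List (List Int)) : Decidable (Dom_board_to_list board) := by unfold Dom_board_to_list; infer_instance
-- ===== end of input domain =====

-- B rebuilds the snake flattening by structural top-down recursion (output built back-to-front,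
-- row direction from the parity of the rows below, decrement inline) instead of A's bottom-up
-- index loop with a toggling flag plus a second decrement pass: alternative decomposition.

-- ===== PORT A =====
def board_to_list (board : List (List Int)) : List Int :=
  let st := (PySem.List.pyRange ((board.length : Int) - 1) (-1) (-1)).foldl
    (fun (st : Bool × List Int) r =>
      if st.1 then (false, st.2 ++ PySem.List.pyGetD board r [])
      else (true, st.2 ++ (PySem.List.pyGetD board r []).reverse))
    (true, [])
  st.2.map (fun x => if x ≠ -1 then x - 1 else x)

-- ===== PORT B =====
def pvDec (c : Int) : Int := if c ≠ -1 then c - 1 else c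

def board_to_list_alt : List (List Int) → List Int
  | [] => []
  | r :: rs =>
      board_to_list_alt rs ++ (if rs.length % 2 == 0 then r else r.reverse).map pvDec

-- ===== PRECONDITION & SPEC =====
def Spec_board_to_list (board : List (List Int)) (out : List Int) : Prop := out = board_to_list_alt board
instance (board : List (List Int)) (out : List Int) : Decidable (Spec_board_to_list board out) := by unfold Spec_board_to_list; infer_instance

-- ===== CLAIM (what is proved, stated in full; the proofs are below) =====
def Claim_equal_board_to_list : Prop := ∀ (board : List (List Int)), Dom_board_to_list board → Spec_board_to_list board (board_to_list board)

-- ===== LEMMAS AND PROOFS =====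

-- snake-order flattening, flag = current row taken left-to-right
def pvSnake : Bool → List (List Int) → List Int
  | _, [] => []
  | true, r :: rs => r ++ pvSnake false rs
  | false, r :: rs => r.reverse ++ pvSnake true rs

-- A's row loop, expressed over the row list directly, equals acc ++ snake
theorem pvA_fold (rs : List (List Int)) (b : Bool) (acc : List Int) :
    (rs.foldl (fun (st : Bool × List Int) row =>
        if st.1 then (false, st.2 ++ row) else (true, st.2 ++ row.reverse)) (b, acc)).2
      = acc ++ pvSnake b rs := by
  induction rs generalizing b acc with
  | nil => simp [pvSnake]
  | cons r rs ih =>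
    cases b <;> simp [pvSnake, ih, List.append_assoc]

-- appending one row at the bottom-most end of the snake: orientation by parity vs starting flag
theorem pvSnake_append_singleton (l : List (List Int)) (b : Bool) (r : List Int) :
    pvSnake b (l ++ [r])
      = pvSnake b l ++ (if (l.length % 2 == 0) == b then r else r.reverse) := by
  induction l generalizing b with
  | nil => cases b <;> simp [pvSnake]
  | cons x xs ih =>
    have hpar : ((x :: xs).length % 2 == 0) = !(xs.length % 2 == 0) := by
      simp only [List.length_cons]
      rcases Nat.mod_two_eq_zero_or_one xs.length with h | h <;> simp [h, Nat.add_mod]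
    cases b <;> simp [pvSnake, ih, List.append_assoc] <;>
      rcases Nat.mod_two_eq_zero_or_one xs.length with h | h <;> simp [h] <;>
      (intro hc; exact absurd hc (by omega))

-- B equals dec-map of snake over the reversed board
theorem pvB_eq_snake (rs : List (List Int)) :
    board_to_list_alt rs = (pvSnake true rs.reverse).map pvDec := by
  induction rs with
  | nil => simp [board_to_list_alt, pvSnake]
  | cons r rs ih =>
    simp only [board_to_list_alt, List.reverse_cons, pvSnake_append_singleton, ih,
      List.length_reverse, List.map_append]
    by_cases h : rs.length % 2 = 0 <;> simp [h]

-- ===== VERDICT (by name: the statement is the Claim_ definition above) =====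
theorem board_to_list_spec : Claim_equal_board_to_list := by
  intro board _
  unfold Spec_board_to_list board_to_list
  have hidx : PySem.List.pyRange ((board.length : Int) - 1) (-1) (-1)
      = (PySem.List.pyRange 0 (board.length : Int) 1).reverse := by
    have := PySem.List.pyRange_neg_one_eq_reverse ((board.length : Int) - 1) (-1)
    simpa using this
  have hmap : (PySem.List.pyRange 0 (board.length : Int) 1).map
      (fun r => PySem.List.pyGetD board r []) = board :=
    PySem.List.map_pyGetD_pyRange_zero' board []
  have hA : (PySem.List.pyRange ((board.length : Int) - 1) (-1) (-1)).foldl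
      (fun (st : Bool × List Int) r =>
        if st.1 then (false, st.2 ++ PySem.List.pyGetD board r [])
        else (true, st.2 ++ (PySem.List.pyGetD board r []).reverse))
      (true, [])
      = board.reverse.foldl
        (fun (st : Bool × List Int) row =>
          if st.1 then (false, st.2 ++ row) else (true, st.2 ++ row.reverse)) (true, []) := by
    rw [hidx]
    conv_rhs => rw [← hmap, ← List.map_reverse, List.foldl_map]
  rw [hA]
  simp only [pvA_fold, List.nil_append, pvB_eq_snake]
  rfl
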